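-- pv_equiv track=rewrite | github.com/g2git/adventofcode | 16-reindeer_maze.py | count_multiple_occurrences
-- ===== SOURCE A (Python) =====
-- def count_multiple_occurrences(paths):
--     position_count = {}
--
--     # Count the occurrences of each position across all paths
--     for path in paths:
--         for position in path:
--             if position in position_count:
--                 position_count[position] += 1
--             else:
--                 position_count[position] = 1
--
--     # Count how many positions appear in more than one path
--     multiple_occurrences = sum(1 for count in position_count.values() if count > 1)
--
--     return multiple_occurrences
-- ===== SOURCE B (Python) =====
-- def count_multiple_occurrences(paths):
--     seen_once = set()
--     seen_multiple = set()
--     for path in paths: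
--         for position in path:
--             if position in seen_multiple:
--                 continue
--             elif position in seen_once:
--                 seen_once.remove(position)
--                 seen_multiple.add(position)
--             else:
--                 seen_once.add(position)
--     return len(seen_multiple)
-- ===== Notes on version B (the rewrite author's own statement) =====
-- stated objective: idiomatic
-- what changed: Replaces the count dictionary plus a second counting pass over its values by two sets (seen_once/seen_multiple) maintained in a single pass; the answer is simply len(seen_multiple).
import Mathlib
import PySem

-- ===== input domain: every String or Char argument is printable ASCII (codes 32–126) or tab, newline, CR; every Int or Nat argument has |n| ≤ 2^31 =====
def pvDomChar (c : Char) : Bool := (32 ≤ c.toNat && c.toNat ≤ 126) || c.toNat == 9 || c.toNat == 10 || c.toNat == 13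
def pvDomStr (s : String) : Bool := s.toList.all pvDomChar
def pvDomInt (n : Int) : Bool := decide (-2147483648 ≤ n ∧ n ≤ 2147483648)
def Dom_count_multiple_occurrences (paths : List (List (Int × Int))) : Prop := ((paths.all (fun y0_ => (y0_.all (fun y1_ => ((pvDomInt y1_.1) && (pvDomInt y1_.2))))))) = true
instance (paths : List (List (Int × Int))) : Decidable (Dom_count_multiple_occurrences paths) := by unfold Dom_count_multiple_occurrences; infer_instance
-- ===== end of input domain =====

-- B replaces A's count dictionary + second counting pass by two sets (seen_once / seen_multiple)
-- maintained in the same single pass; the answer is len(seen_multiple). Same cost, more idiomatic.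


-- ===== PORT A =====
-- 'if position in position_count: position_count[position] += 1 else: position_count[position] = 1'
def cmoStep (d : PySem.Dict (Int × Int) Int) (position : Int × Int) : PySem.Dict (Int × Int) Int :=
  if d.contains position then d.insert position (d.getD position 0 + 1)
  else d.insert position 1

def count_multiple_occurrences (paths : List (List (Int × Int))) : Int :=
  -- position_count after the two nested loops, then sum(1 for count in .values() if count > 1)
  (paths.foldl (fun d path => path.foldl cmoStep d) PySem.Dict.empty).values.foldl
    (fun acc count => if count > 1 then acc + 1 else acc) 0

-- ===== PORT B =====
-- state = (seen_once, seen_multiple); 'seen_once.remove(position)' fires only when the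
-- membership test just succeeded, so it is exactly Set.discard (never a KeyError).
def cmoAltStep (s : PySem.Set (Int × Int) × PySem.Set (Int × Int)) (position : Int × Int) :
    PySem.Set (Int × Int) × PySem.Set (Int × Int) :=
  if PySem.Set.contains s.2 position then s
  else if PySem.Set.contains s.1 position then (PySem.Set.discard s.1 position, PySem.Set.add s.2 position)
  else (PySem.Set.add s.1 position, s.2)

def count_multiple_occurrences_alt (paths : List (List (Int × Int))) : Int :=
  -- len(seen_multiple) after the two nested loops over (seen_once, seen_multiple)
  PySem.Set.len
    (paths.foldl (fun s path => path.foldl cmoAltStep s) (PySem.Set.empty, PySem.Set.empty)).2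

-- ===== PRECONDITION & SPEC =====
def Spec_count_multiple_occurrences (paths : List (List (Int × Int))) (out : Int) : Prop := out = count_multiple_occurrences_alt paths
instance (paths : List (List (Int × Int))) (out : Int) : Decidable (Spec_count_multiple_occurrences paths out) := by unfold Spec_count_multiple_occurrences; infer_instance

-- ===== CLAIM (what is proved, stated in full; the proofs are below) =====
def Claim_equal_count_multiple_occurrences : Prop := ∀ (paths : List (List (Int × Int))), Dom_count_multiple_occurrences paths → Spec_count_multiple_occurrences paths (count_multiple_occurrences paths)

-- ===== LEMMAS AND PROOFS =====

-- A's branch on membership is the uniform 'insert key (getD key 0 + 1)'.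
theorem cmoStep_eq : cmoStep = fun d x => d.insert x (d.getD x 0 + 1) := by
  funext d x
  unfold cmoStep
  by_cases h : d.contains x = true
  · simp [h]
  · have h' : d.contains x = false := by simpa using h
    rw [if_neg (by simp [h']), PySem.Dict.getD_of_not_contains d 0 h']
    norm_num

-- A's dictionary over the whole input is the counter of the flattened positions.
theorem cmo_dict_eq (paths : List (List (Int × Int))) :
    paths.foldl (fun d path => path.foldl cmoStep d) PySem.Dict.empty
      = PySem.Dict.counter paths.flatten := by
  rw [← List.foldl_flatten, cmoStep_eq, PySem.Dict.foldl_insert_getD_add_one_eq_counter]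

-- Invariant of B's loop: after processing xs, seen_once holds exactly the positions with
-- count 1 in xs, seen_multiple exactly those with count ≥ 2, both without duplicates.
theorem cmoAlt_inv (xs : List (Int × Int)) :
    (xs.foldl cmoAltStep (PySem.Set.empty, PySem.Set.empty)).1.Nodup ∧
    (xs.foldl cmoAltStep (PySem.Set.empty, PySem.Set.empty)).2.Nodup ∧
    (∀ y, y ∈ (xs.foldl cmoAltStep (PySem.Set.empty, PySem.Set.empty)).1 ↔ xs.count y = 1) ∧
    (∀ y, y ∈ (xs.foldl cmoAltStep (PySem.Set.empty, PySem.Set.empty)).2 ↔ 2 ≤ xs.count y) := by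
  induction xs using List.reverseRecOn with
  | nil => simp [PySem.Set.empty]
  | append_singleton xs x ih =>
    obtain ⟨h1, h2, ho, hm⟩ := ih
    set s := xs.foldl cmoAltStep (PySem.Set.empty, PySem.Set.empty) with hs
    have hcount : ∀ y : Int × Int, (xs ++ [x]).count y = xs.count y + (if x = y then 1 else 0) := by
      intro y
      simp [List.count_append, List.count_singleton]
    rw [List.foldl_append]
    simp only [List.foldl_cons, List.foldl_nil, ← hs]
    unfold cmoAltStep
    by_cases hx2 : PySem.Set.contains s.2 x = true
    · have hx2' : 2 ≤ xs.count x := (hm x).1 ((PySem.Set.contains_iff _ _).mp hx2)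
      rw [if_pos hx2]
      refine ⟨h1, h2, ?_, ?_⟩ <;> intro y <;> rw [hcount y] <;>
        [rw [ho y]; rw [hm y]] <;> by_cases hxy : x = y
      · subst hxy; rw [if_pos rfl]; omega
      · rw [if_neg hxy]; omega
      · subst hxy; rw [if_pos rfl]; omega
      · rw [if_neg hxy]; omega
    · have hx2' : ¬ 2 ≤ xs.count x := fun h => hx2 ((PySem.Set.contains_iff _ _).mpr ((hm x).mpr h))
      rw [if_neg hx2]
      by_cases hx1 : PySem.Set.contains s.1 x = true
      · have hx1' : xs.count x = 1 := (ho x).1 ((PySem.Set.contains_iff _ _).mp hx1)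
        rw [if_pos hx1]
        refine ⟨PySem.Set.nodup_discard s.1 x h1, PySem.Set.nodup_add s.2 x h2, ?_, ?_⟩ <;>
          intro y <;> rw [hcount y] <;>
          [rw [PySem.Set.mem_discard, ho y]; rw [PySem.Set.mem_add, hm y]] <;> by_cases hxy : x = y
        · subst hxy; rw [if_pos rfl]; constructor
          · rintro ⟨_, h⟩; exact absurd rfl h
          · omega
        · rw [if_neg hxy]
          constructor
          · rintro ⟨h, _⟩; omega
          · intro h; exact ⟨by omega, Ne.symm hxy⟩
        · subst hxy; rw [if_pos rfl]; constructor
          · intro _; omega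
          · intro _; right; rfl
        · rw [if_neg hxy]; constructor
          · rintro (h | h); · omega
            · exact absurd h.symm hxy
          · intro h; left; omega
      · have hx1' : xs.count x ≠ 1 := fun h => hx1 ((PySem.Set.contains_iff _ _).mpr ((ho x).mpr h))
        have hx0 : xs.count x = 0 := by omega
        rw [if_neg hx1]
        refine ⟨PySem.Set.nodup_add s.1 x h1, h2, ?_, ?_⟩ <;> intro y <;> rw [hcount y] <;>
          [rw [PySem.Set.mem_add, ho y]; rw [hm y]] <;> by_cases hxy : x = y
        · subst hxy; rw [if_pos rfl]; constructor
          · intro _; omega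
          · intro _; right; rfl
        · rw [if_neg hxy]; constructor
          · rintro (h | h); · omega
            · exact absurd h.symm hxy
          · intro h; left; omega
        · subst hxy; rw [if_pos rfl]; omega
        · rw [if_neg hxy]; omega

-- ===== VERDICT (by name: the statement is the Claim_ definition above) =====
theorem count_multiple_occurrences_spec : Claim_equal_count_multiple_occurrences := by
  intro paths _
  unfold Spec_count_multiple_occurrences count_multiple_occurrences count_multiple_occurrences_alt
  rw [cmo_dict_eq paths, ← List.foldl_flatten]
  set xs := paths.flatten with hxs
  obtain ⟨h1, h2, ho, hm⟩ := cmoAlt_inv xs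
  set s := xs.foldl cmoAltStep (PySem.Set.empty, PySem.Set.empty) with hs
  -- A's side: a 0/1 fold over the counter's values is a countP over the distinct positions
  have hvals : (PySem.Dict.counter xs).values
      = (PySem.Set.ofList xs).map (fun k => ((xs.count k : Int))) := by
    show ((PySem.Dict.counter xs).items).map Prod.snd = _
    rw [PySem.Dict.items_counter]
    simp [List.map_map, Function.comp]
  rw [hvals, PySem.List.foldl_ite_add_one (p := fun c : Int => c > 1), List.countP_map]
  -- both sides count the distinct positions of count ≥ 2
  have hfilt : ((PySem.Set.ofList xs).filter
      ((fun c : Int => decide (c > 1)) ∘ fun k => ((xs.count k : Int)))).length = s.2.length := by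
    have hperm : ((PySem.Set.ofList xs).filter
        ((fun c : Int => decide (c > 1)) ∘ fun k => ((xs.count k : Int)))).Perm s.2 := by
      rw [List.perm_ext_iff_of_nodup (List.Nodup.filter _ (PySem.Set.nodup_ofList xs)) h2]
      intro y
      rw [List.mem_filter, PySem.Set.mem_ofList, hm y]
      constructor
      · rintro ⟨_, hy⟩
        simp only [Function.comp, decide_eq_true_eq] at hy
        omega
      · intro hy
        refine ⟨List.count_pos_iff.mp (by omega), ?_⟩
        simp only [Function.comp, decide_eq_true_eq]
        exact_mod_cast by omega
    exact hperm.length_eq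
  rw [List.countP_eq_length_filter, hfilt]
  simp [PySem.Set.len]
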